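-- pv_equiv track=rewrite | github.com/MokshithRao/CSPP | RECAP_CSPP/Oct16/rotate_matrix (copy)/solution.py | rotate_matrix_withangle
-- ===== SOURCE A (Python) =====
-- def rotate_matrix_withangle(matrix, angle):
--     n = len(matrix)
--
--     if angle == 0:
--         return matrix
--     elif angle == 90:
--         return [[matrix[n - j - 1][i] for j in range(n)] for i in range(n)]
--     elif angle == 180:
--         return [[matrix[n - i - 1][n - j - 1] for j in range(n)] for i in range(n)]
--     elif angle == 270:
--         return [[matrix[j][n - i - 1] for j in range(n)] for i in range(n)]
--     else:
--         return matrix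
-- ===== SOURCE B (Python) =====
-- def rotate_matrix_withangle(matrix, angle):
--     if angle not in (90, 180, 270):
--         return matrix
--     result = matrix
--     for _ in range(angle // 90):
--         result = [list(row) for row in zip(*result[::-1])]
--     return result
-- ===== Notes on version B (the rewrite author's own statement) =====
-- stated objective: idiomatic
-- what changed: Replaces the three hand-written index-map comprehensions by a single rotate-90 step (reverse then zip-transpose) applied angle//90 times.
-- outside the precondition, e.g. on rotate_matrix_withangle([[1, 2, 3], [4, 5, 6]], 90): A returns [[4, 1], [5, 2]], B returns [[4, 1], [5, 2], [6, 3]]; on rotate_matrix_withangle([[1], [2, 3]], 90): A raises IndexError, B returns [[2, 1]]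
import Mathlib
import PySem

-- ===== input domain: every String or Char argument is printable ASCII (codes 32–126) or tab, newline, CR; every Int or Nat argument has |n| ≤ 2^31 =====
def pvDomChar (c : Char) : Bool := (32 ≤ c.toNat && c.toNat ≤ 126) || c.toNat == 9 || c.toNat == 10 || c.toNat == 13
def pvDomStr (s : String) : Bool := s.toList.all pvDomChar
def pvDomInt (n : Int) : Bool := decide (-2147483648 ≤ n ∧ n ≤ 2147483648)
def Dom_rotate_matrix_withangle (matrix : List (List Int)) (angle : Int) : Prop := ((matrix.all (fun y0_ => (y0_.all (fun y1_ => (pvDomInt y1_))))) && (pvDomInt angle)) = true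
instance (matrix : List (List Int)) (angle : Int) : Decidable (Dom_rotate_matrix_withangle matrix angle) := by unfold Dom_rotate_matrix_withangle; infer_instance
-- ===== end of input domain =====

-- B rebuilds the rotation as (reverse; zip-transpose) applied angle//90 times instead of three
-- hand-written index-map comprehensions; equivalence is claimed on the function's natural n×n domain.

-- ===== PORT A =====
-- matrix[a][b] under Pre_ (indices in range): pyGetD on the row list, then on the row
def pvAt (m : List (List Int)) (a b : Int) : Int :=
  PySem.List.pyGetD (PySem.List.pyGetD m a []) b 0

def rotate_matrix_withangle (matrix : List (List Int)) (angle : Int) : List (List Int) :=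
  let n : Int := matrix.length
  if angle = 0 then matrix
  else if angle = 90 then
    (PySem.List.pyRange 0 n 1).map (fun i =>
      (PySem.List.pyRange 0 n 1).map (fun j => pvAt matrix (n - j - 1) i))
  else if angle = 180 then
    (PySem.List.pyRange 0 n 1).map (fun i =>
      (PySem.List.pyRange 0 n 1).map (fun j => pvAt matrix (n - i - 1) (n - j - 1)))
  else if angle = 270 then
    (PySem.List.pyRange 0 n 1).map (fun i =>
      (PySem.List.pyRange 0 n 1).map (fun j => pvAt matrix j (n - i - 1)))
  else matrix

-- ===== PORT B =====
-- Python's zip(*rows): truncate at the shortest row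
def pvZip (rows : List (List Int)) : List (List Int) :=
  if h : rows = [] ∨ rows.any (·.isEmpty) then []
  else (rows.map (fun r => r.headD 0)) :: pvZip (rows.map (fun r => r.tail))
termination_by ((rows.headD []).length)
decreasing_by
  cases rows with
  | nil => exact absurd (Or.inl rfl) h
  | cons r t =>
      cases r with
      | nil => exact absurd (Or.inr (by simp)) h
      | cons a rt => simp

def pvRotate90 (m : List (List Int)) : List (List Int) := pvZip m.reverse

def rotate_matrix_withangle_alt (matrix : List (List Int)) (angle : Int) : List (List Int) :=
  if angle ≠ 90 ∧ angle ≠ 180 ∧ angle ≠ 270 then matrix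
  else (PySem.List.pyRange 0 (PySem.Int.floordiv angle 90) 1).foldl
        (fun result _ => pvRotate90 result) matrix

-- ===== PRECONDITION & SPEC =====
-- Pre_ keeps the rotating angles to the function's natural n×n domain: on ragged input A raises
-- IndexError (rows shorter than len(matrix)) or silently ignores columns beyond len(matrix).
def Pre_rotate_matrix_withangle (matrix : List (List Int)) (angle : Int) : Prop :=
  (angle = 90 ∨ angle = 180 ∨ angle = 270) → ∀ row ∈ matrix, row.length = matrix.length
instance (matrix : List (List Int)) (angle : Int) : Decidable (Pre_rotate_matrix_withangle matrix angle) := by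
  unfold Pre_rotate_matrix_withangle; infer_instance

def pvWitness_rotate_matrix_withangle : List (List Int) × Int := ([[1, 2], [3, 4]], 90)

def Spec_rotate_matrix_withangle (matrix : List (List Int)) (angle : Int) (out : List (List Int)) : Prop := out = rotate_matrix_withangle_alt matrix angle
instance (matrix : List (List Int)) (angle : Int) (out : List (List Int)) : Decidable (Spec_rotate_matrix_withangle matrix angle out) := by unfold Spec_rotate_matrix_withangle; infer_instance

-- ===== CLAIM (what is proved, stated in full; the proofs are below) =====
def Claim_equal_rotate_matrix_withangle : Prop := ∀ (matrix : List (List Int)) (angle : Int), Dom_rotate_matrix_withangle matrix angle → Pre_rotate_matrix_withangle matrix angle → Spec_rotate_matrix_withangle matrix angle (rotate_matrix_withangle matrix angle)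

-- ===== LEMMAS AND PROOFS =====

-- matrix entry (a, b) with Nat indices and defaults
def pvGE (m : List (List Int)) (a b : Nat) : Int := (m.getD a []).getD b 0

-- the index map a single clockwise rotation realises on an n×n matrix
def pvRotSpec (m : List (List Int)) (n : Nat) : List (List Int) :=
  (List.range n).map (fun i => (List.range n).map (fun j => pvGE m (n - 1 - j) i))

theorem pvZip_char (c : Nat) : ∀ (rows : List (List Int)), rows ≠ [] →
    (∀ row ∈ rows, row.length = c) →
    pvZip rows = (List.range c).map (fun j => rows.map (fun row => row.getD j 0)) := by
  induction c with
  | zero =>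
      intro rows hne hlen
      rw [pvZip]
      have : rows.any (·.isEmpty) = true := by
        cases rows with
        | nil => exact absurd rfl hne
        | cons r t =>
            have := hlen r (by simp)
            simp [List.any_cons, List.eq_nil_of_length_eq_zero this]
      simp [this]
  | succ c ih =>
      intro rows hne hlen
      rw [pvZip]
      have hnoemp : rows.any (·.isEmpty) = false := by
        rw [List.any_eq_false]
        intro r hr
        have := hlen r hr
        simp [List.isEmpty_iff]
        intro h0; rw [h0] at this; simp at this
      have htne : rows.map (fun r => r.tail) ≠ [] := by simpa using hne
      have htlen : ∀ row ∈ rows.map (fun r => r.tail), row.length = c := by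
        intro row hrow
        rcases List.mem_map.mp hrow with ⟨r, hr, rfl⟩
        have := hlen r hr
        simp [List.length_tail, this]
      rw [dif_neg (by simp [hne, hnoemp]), ih _ htne htlen]
      rw [List.range_succ_eq_map]
      simp only [List.map_cons, List.map_map]
      congr 1
      · apply List.map_congr_left
        intro r hr
        have : r.length = c + 1 := hlen r hr
        cases r with
        | nil => simp at this
        | cons a rt => simp
      · apply List.map_congr_left
        intro j _
        apply List.map_congr_left
        intro r hr
        have : r.length = c + 1 := hlen r hr
        cases r with
        | nil => simp at this
        | cons a rt => simp

theorem pvRotate90_char (m : List (List Int)) (n : Nat) (hn : m.length = n)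
    (hsq : ∀ row ∈ m, row.length = n) : pvRotate90 m = pvRotSpec m n := by
  cases n with
  | zero =>
      have : m = [] := List.eq_nil_of_length_eq_zero hn
      subst this
      rw [pvRotate90, pvZip]
      simp [pvRotSpec]
  | succ k =>
      have hne : m.reverse ≠ [] := by
        simp [List.reverse_eq_nil_iff]
        intro h; rw [h] at hn; simp at hn
      have hlen : ∀ row ∈ m.reverse, row.length = k + 1 := by
        intro row hrow; exact hsq row (List.mem_reverse.mp hrow)
      rw [pvRotate90, pvZip_char (k + 1) m.reverse hne hlen]
      unfold pvRotSpec
      apply List.map_congr_left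
      intro i _
      apply List.ext_getElem
      · simp [hn]
      · intro j hj1 hj2
        simp only [List.length_map, List.length_reverse, hn] at hj1
        simp only [List.getElem_map, List.getElem_range, List.getElem_reverse, hn]
        unfold pvGE
        rw [List.getD_eq_getElem m [] (by omega)]

theorem pvRotSpec_square (m : List (List Int)) (n : Nat) :
    (pvRotSpec m n).length = n ∧ ∀ row ∈ pvRotSpec m n, row.length = n := by
  constructor
  · simp [pvRotSpec]
  · intro row hrow
    rcases List.mem_map.mp hrow with ⟨i, _, rfl⟩
    simp

theorem pvGE_rotSpec (m : List (List Int)) (n a b : Nat) (ha : a < n) (hb : b < n) :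
    pvGE (pvRotSpec m n) a b = pvGE m (n - 1 - b) a := by
  unfold pvRotSpec pvGE
  rw [List.getD_eq_getElem _ [] (by simpa using ha)]
  simp only [List.getElem_map, List.getElem_range]
  rw [List.getD_eq_getElem _ 0 (by simpa using hb)]
  simp

-- A's three branches, written through pvGE
theorem pvA_char (m : List (List Int)) (n : Nat) (hn : m.length = n) :
    ((PySem.List.pyRange 0 (m.length : Int) 1).map (fun i =>
      (PySem.List.pyRange 0 (m.length : Int) 1).map (fun j => pvAt m ((m.length : Int) - j - 1) i))
      = (List.range n).map (fun i => (List.range n).map (fun j => pvGE m (n - 1 - j) i)))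
    ∧ ((PySem.List.pyRange 0 (m.length : Int) 1).map (fun i =>
      (PySem.List.pyRange 0 (m.length : Int) 1).map (fun j => pvAt m ((m.length : Int) - i - 1) ((m.length : Int) - j - 1)))
      = (List.range n).map (fun i => (List.range n).map (fun j => pvGE m (n - 1 - i) (n - 1 - j))))
    ∧ ((PySem.List.pyRange 0 (m.length : Int) 1).map (fun i =>
      (PySem.List.pyRange 0 (m.length : Int) 1).map (fun j => pvAt m j ((m.length : Int) - i - 1)))
      = (List.range n).map (fun i => (List.range n).map (fun j => pvGE m j (n - 1 - i)))) := by
  subst hn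
  rw [PySem.List.pyRange_zero_natCast]
  refine ⟨?_, ?_, ?_⟩ <;>
  · simp only [List.map_map]
    apply List.map_congr_left
    intro i hi
    simp only [Function.comp]
    apply List.map_congr_left
    intro j hj
    simp only [Function.comp]
    have hi' : i < m.length := List.mem_range.mp hi
    have hj' : j < m.length := List.mem_range.mp hj
    unfold pvAt pvGE
    first
      | (rw [show ((m.length : Int) - (j : Int) - 1) = ((m.length - 1 - j : Nat) : Int) from by omega,
             show ((m.length : Int) - (i : Int) - 1) = ((m.length - 1 - i : Nat) : Int) from by omega]
         simp [PySem.List.pyGetD_natCast])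
      | (rw [show ((m.length : Int) - (j : Int) - 1) = ((m.length - 1 - j : Nat) : Int) from by omega]
         simp [PySem.List.pyGetD_natCast])
      | (rw [show ((m.length : Int) - (i : Int) - 1) = ((m.length - 1 - i : Nat) : Int) from by omega]
         simp [PySem.List.pyGetD_natCast])

-- ===== VERDICT (by name: the statement is the Claim_ definition above) =====
theorem rotate_matrix_withangle_spec : Claim_equal_rotate_matrix_withangle := by
  intro matrix angle _ hpre
  unfold Spec_rotate_matrix_withangle
  set n := matrix.length with hn
  obtain ⟨hA90, hA180, hA270⟩ := pvA_char matrix n rfl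
  by_cases h90 : angle = 90
  · subst h90
    have hsq := hpre (Or.inl rfl)
    have hr : PySem.List.pyRange 0 (PySem.Int.floordiv 90 90) 1 = [0] := by decide
    rw [rotate_matrix_withangle_alt]
    rw [if_neg (by simp), hr]
    simp only [List.foldl_cons, List.foldl_nil]
    rw [pvRotate90_char matrix n rfl hsq]
    rw [rotate_matrix_withangle]
    simp only [if_neg (by norm_num : (90:Int) ≠ 0)]
    exact hA90
  · by_cases h180 : angle = 180
    · subst h180
      have hsq := hpre (Or.inr (Or.inl rfl))
      have hr : PySem.List.pyRange 0 (PySem.Int.floordiv 180 90) 1 = [0, 1] := by decide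
      rw [rotate_matrix_withangle_alt, if_neg (by simp), hr]
      simp only [List.foldl_cons, List.foldl_nil]
      rw [pvRotate90_char matrix n rfl hsq]
      obtain ⟨hl1, hs1⟩ := pvRotSpec_square matrix n
      rw [pvRotate90_char _ n hl1 hs1]
      rw [rotate_matrix_withangle]
      simp only [if_neg (by norm_num : (180:Int) ≠ 0), if_neg (by norm_num : (180:Int) ≠ 90)]
      rw [hA180]
      conv_rhs => rw [pvRotSpec]
      apply List.map_congr_left
      intro i hi
      apply List.map_congr_left
      intro j hj
      have hi' : i < n := List.mem_range.mp hi
      have hj' : j < n := List.mem_range.mp hj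
      rw [pvGE_rotSpec matrix n (n - 1 - j) i (by omega) hi']
    · by_cases h270 : angle = 270
      · subst h270
        have hsq := hpre (Or.inr (Or.inr rfl))
        have hr : PySem.List.pyRange 0 (PySem.Int.floordiv 270 90) 1 = [0, 1, 2] := by decide
        rw [rotate_matrix_withangle_alt, if_neg (by simp), hr]
        simp only [List.foldl_cons, List.foldl_nil]
        rw [pvRotate90_char matrix n rfl hsq]
        obtain ⟨hl1, hs1⟩ := pvRotSpec_square matrix n
        rw [pvRotate90_char _ n hl1 hs1]
        obtain ⟨hl2, hs2⟩ := pvRotSpec_square (pvRotSpec matrix n) n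
        rw [pvRotate90_char _ n hl2 hs2]
        rw [rotate_matrix_withangle]
        simp only [if_neg (by norm_num : (270:Int) ≠ 0), if_neg (by norm_num : (270:Int) ≠ 90),
          if_neg (by norm_num : (270:Int) ≠ 180)]
        rw [hA270]
        conv_rhs => rw [pvRotSpec]
        apply List.map_congr_left
        intro i hi
        apply List.map_congr_left
        intro j hj
        have hi' : i < n := List.mem_range.mp hi
        have hj' : j < n := List.mem_range.mp hj
        rw [pvGE_rotSpec (pvRotSpec matrix n) n (n - 1 - j) i (by omega) hi']
        rw [pvGE_rotSpec matrix n (n - 1 - i) (n - 1 - j) (by omega) (by omega)]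
        congr 1
        omega
      · rw [rotate_matrix_withangle_alt, if_pos ⟨h90, h180, h270⟩]
        rw [rotate_matrix_withangle]
        by_cases h0 : angle = 0
        · simp [h0]
        · simp [h0, h90, h180, h270]
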